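-- pv_equiv track=rewrite | github.com/miniLQ/onemore | tools/linux-ramdump-parser-v2/parsers/runqueue.py | ffs
-- ===== SOURCE A (Python) =====
-- def ffs(num):
--     # Check there is at least one bit set.
--     if num == 0:
--         return None
--     # Right-shift until we have the first set bit in the LSB position.
--     i = 0
--     while (num % 2) == 0:
--         i += 1
--         num = num >> 1
--     return i
-- ===== SOURCE B (Python) =====
-- def ffs(num):
--     # Check there is at least one bit set.
--     if num == 0:
--         return None
--     # num & -num isolates the lowest set bit; its bit_length minus one is its index.
--     return (num & -num).bit_length() - 1
-- ===== Notes on version B (the rewrite author's own statement) =====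
-- stated objective: idiomatic
-- what changed: Replaced the right-shift counting loop with the closed-form bit trick: num & -num isolates the lowest set bit, and its bit_length minus one is returned, with no iteration.
import Mathlib
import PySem

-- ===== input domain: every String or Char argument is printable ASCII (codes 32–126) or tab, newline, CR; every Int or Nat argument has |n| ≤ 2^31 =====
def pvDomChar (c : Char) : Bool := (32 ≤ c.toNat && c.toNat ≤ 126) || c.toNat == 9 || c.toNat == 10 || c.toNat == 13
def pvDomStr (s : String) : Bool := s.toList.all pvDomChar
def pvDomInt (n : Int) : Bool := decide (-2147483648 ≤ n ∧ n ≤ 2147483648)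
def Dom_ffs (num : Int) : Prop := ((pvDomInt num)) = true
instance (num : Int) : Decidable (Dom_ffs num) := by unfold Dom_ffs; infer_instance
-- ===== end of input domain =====

-- B replaces A's right-shift counting loop by the closed-form low-bit trick
-- the low-bit trick num & -num with bit_length (same values, no iteration; idiomatic).


-- ===== PORT A =====
-- the while loop: i accumulates the shift count; the `num ≠ 0` hypothesis is
-- carried only for termination (Python's loop would also diverge on 0, but A
-- guards it away before entering the loop)
def ffsLoop (num : Int) (hnum : num ≠ 0) (i : Int) : Int :=
  if h : PySem.Int.mod num 2 = 0 then
    ffsLoop (num >>> (1:Nat))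
      (by
        have hd := (PySem.Int.mod_eq_zero_iff_dvd num 2).mp h
        rw [Int.shiftRight_eq_div_pow]; omega)
      (i + 1)
  else i
termination_by num.natAbs
decreasing_by
  have hd := (PySem.Int.mod_eq_zero_iff_dvd num 2).mp h
  rw [Int.shiftRight_eq_div_pow]; omega

def ffs (num : Int) : Option Int :=
  if h : num = 0 then none
  else some (ffsLoop num h 0)

-- ===== PORT B =====
def ffs_alt (num : Int) : Option Int :=
  if num = 0 then none
  else some ((PySem.Int.bitLength (PySem.Int.band num (-num)) : Int) - 1)

-- ===== PRECONDITION & SPEC =====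
def Spec_ffs (num : Int) (out : Option Int) : Prop := out = ffs_alt num
instance (num : Int) (out : Option Int) : Decidable (Spec_ffs num out) := by unfold Spec_ffs; infer_instance

-- ===== CLAIM (what is proved, stated in full; the proofs are below) =====
def Claim_equal_ffs : Prop := ∀ (num : Int), Dom_ffs num → Spec_ffs num (ffs num)

-- ===== LEMMAS AND PROOFS =====

-- (2k+1) &&& 2k = 2k : an odd number AND its predecessor clears exactly bit 0
theorem pv_and_odd (k : Nat) : (2 * k + 1) &&& (2 * k) = 2 * k := by
  have h1 : 2 * k + 1 = Nat.bit true k := by simp [Nat.bit_val]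
  have h2 : 2 * k = Nat.bit false k := by simp [Nat.bit_val]
  rw [h1, h2]
  show Nat.bitwise and _ _ = _
  rw [Nat.bitwise_bit]
  have : Nat.bitwise and k k = k := Nat.and_self k
  simp [Nat.bit_val, this]

-- 2j &&& (2j - 1) = 2 * (j &&& (j - 1)) for j > 0 : AND-with-predecessor halves
theorem pv_and_even (j : Nat) (hj : 0 < j) :
    (2 * j) &&& (2 * j - 1) = 2 * (j &&& (j - 1)) := by
  have h1 : 2 * j = Nat.bit false j := by simp [Nat.bit_val]
  have h2 : 2 * j - 1 = Nat.bit true (j - 1) := by simp [Nat.bit_val]; omega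
  rw [h2, h1]
  show Nat.bitwise and _ _ = _
  rw [Nat.bitwise_bit]
  show Nat.bit false (j &&& (j - 1)) = _
  simp [Nat.bit_val]

-- PySem.Int.band n (-n) in terms of natAbs, for n ≠ 0
theorem pv_band_natAbs (n : Int) (h : n ≠ 0) :
    PySem.Int.band n (-n) = ((n.natAbs - (n.natAbs &&& (n.natAbs - 1)) : Nat) : Int) := by
  rcases lt_or_gt_of_ne h with hneg | hpos
  · have h1 : ¬ (0 : Int) ≤ n := by omega
    have h2 : (0 : Int) ≤ -n := by omega
    simp only [PySem.Int.band, if_neg h1, if_pos h2]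
    have e1 : (-n).toNat = n.natAbs := by omega
    have e2 : (-n - 1).toNat = n.natAbs - 1 := by omega
    rw [e1, e2]
  · have h1 : (0 : Int) ≤ n := by omega
    have h2 : ¬ (0 : Int) ≤ -n := by omega
    simp only [PySem.Int.band, if_pos h1, if_neg h2]
    have e1 : n.toNat = n.natAbs := by omega
    have e2 : (-(-n) - 1).toNat = n.natAbs - 1 := by omega
    rw [e1, e2]

theorem pv_band_pos (n : Int) (h : n ≠ 0) : 0 < PySem.Int.band n (-n) := by
  rw [pv_band_natAbs n h]
  have hle : n.natAbs &&& (n.natAbs - 1) ≤ n.natAbs - 1 := Nat.and_le_right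
  omega

theorem pv_band_double (n m : Int) (hm : m ≠ 0) (hnm : n = 2 * m) :
    PySem.Int.band n (-n) = 2 * PySem.Int.band m (-m) := by
  have hn : n ≠ 0 := by omega
  rw [pv_band_natAbs n hn, pv_band_natAbs m hm]
  have habs : n.natAbs = 2 * m.natAbs := by omega
  rw [habs, pv_and_even m.natAbs (by omega)]
  have hle : m.natAbs &&& (m.natAbs - 1) ≤ m.natAbs - 1 := Nat.and_le_right
  omega

theorem pv_band_odd (n : Int) (h : PySem.Int.mod n 2 ≠ 0) :
    PySem.Int.band n (-n) = 1 := by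
  have hnd : ¬ (2 : Int) ∣ n := fun hd => h ((PySem.Int.mod_eq_zero_iff_dvd n 2).mpr hd)
  have hn : n ≠ 0 := by rintro rfl; exact hnd ⟨0, by ring⟩
  rw [pv_band_natAbs n hn]
  obtain ⟨k, hk⟩ : ∃ k, n.natAbs = 2 * k + 1 := by
    rcases Nat.even_or_odd n.natAbs with he | ho
    · exfalso; apply hnd; rcases he with ⟨j, hj⟩; omega
    · exact ho
  rw [hk]
  have : (2 * k + 1) - ((2 * k + 1) &&& (2 * k + 1 - 1)) = 1 := by
    have h0 : 2 * k + 1 - 1 = 2 * k := by omega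
    rw [h0, pv_and_odd k]
    omega
  simp only [this]
  rfl

theorem pv_bitLength_double (x : Int) (hx : 0 < x) :
    PySem.Int.bitLength (2 * x) = PySem.Int.bitLength x + 1 := by
  have h2 : (0 : Int) < 2 * x := by omega
  rw [PySem.Int.bitLength_of_pos h2]
  have hfd : PySem.Int.floordiv (2 * x) 2 = x := by
    rw [PySem.Int.floordiv_eq_iff_of_pos (by omega)]
    constructor <;> omega
  rw [hfd]

theorem pv_shift_double (m : Int) : (2 * m) >>> (1:Nat) = m := by
  rw [Int.shiftRight_eq_div_pow]; omega

theorem pv_loop_eq_aux (k : Nat) : ∀ (n : Int) (h : n ≠ 0), n.natAbs = k → ∀ (i : Int),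
    ffsLoop n h i = i + ((PySem.Int.bitLength (PySem.Int.band n (-n)) : Int) - 1) := by
  induction k using Nat.strong_induction_on with
  | _ k ih =>
  intro n h hk i
  by_cases hm : PySem.Int.mod n 2 = 0
  · rw [ffsLoop, dif_pos hm]
    obtain ⟨m, hnm⟩ : ∃ m, n = 2 * m := by
      rcases (PySem.Int.mod_eq_zero_iff_dvd n 2).mp hm with ⟨m, hm2⟩
      exact ⟨m, by omega⟩
    have hm0 : m ≠ 0 := by omega
    have hs : n >>> (1:Nat) = m := by rw [hnm]; exact pv_shift_double m
    have hlt : m.natAbs < k := by omega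
    have hne : n >>> (1:Nat) ≠ 0 := by rw [hs]; exact hm0
    have habs : (n >>> (1:Nat)).natAbs = m.natAbs := by rw [hs]
    rw [ih m.natAbs hlt _ hne habs (i+1)]
    have hbl : PySem.Int.bitLength (PySem.Int.band n (-n))
        = PySem.Int.bitLength (PySem.Int.band (n >>> (1:Nat)) (-(n >>> (1:Nat)))) + 1 := by
      rw [hs, pv_band_double n m hm0 hnm,
        pv_bitLength_double _ (pv_band_pos m hm0)]
    rw [hbl]
    push_cast
    omega
  · rw [ffsLoop, dif_neg hm]
    rw [pv_band_odd n hm]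
    norm_num
    rfl

theorem pv_loop_eq (n : Int) (h : n ≠ 0) (i : Int) :
    ffsLoop n h i = i + ((PySem.Int.bitLength (PySem.Int.band n (-n)) : Int) - 1) :=
  pv_loop_eq_aux n.natAbs n h rfl i

-- ===== VERDICT (by name: the statement is the Claim_ definition above) =====
theorem ffs_spec : Claim_equal_ffs := by
  intro num _
  show ffs num = ffs_alt num
  unfold ffs ffs_alt
  split_ifs with h
  · rfl
  · rw [pv_loop_eq num h 0]
    norm_num
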